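-- pv_equiv track=rewrite | github.com/tehilaco/Final-Project | Project.py | counter_ibs
-- ===== SOURCE A (Python) =====
-- def counter_ibs(cow1,cow2 , num):
--    counter = 0
--    if(num == 0):
--       for i in range(len(cow1)):
--          if ((cow1[i] == 2 and cow2[i] == 0) or (cow1[i] == 0 and cow2[i] == 2)):
--             counter += 1
--          else:
--             counter += 0
--    elif(num == 1):
--       for i in range(len(cow1)):
--          if ((cow1[i] == 2 and cow2[i] == 1) or (cow1[i] == 1 and cow2[i] == 2)
--          or (cow1[i] == 1 and cow2[i] == 0) or (cow1[i] == 0 and cow2[i] == 1)):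
--             counter += 1
--          else:
--             counter += 0
--    else:
--       for i in range(len(cow1)):
--          if (cow1[i] == cow2[i]):
--             counter += 1
--          else:
--             counter += 0
--
--    return counter
-- ===== SOURCE B (Python) =====
-- def counter_ibs(cow1, cow2, num):
--     pairs = [(cow1[i], cow2[i]) for i in range(len(cow1))]
--     table = {}
--     for p in pairs:
--         table[p] = table.get(p, 0) + 1
--     if num == 0:
--         return table.get((2, 0), 0) + table.get((0, 2), 0)
--     if num == 1:
--         return (table.get((2, 1), 0) + table.get((1, 2), 0)
--                 + table.get((1, 0), 0) + table.get((0, 1), 0))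
--     return sum(v for (a, b), v in table.items() if a == b)
-- ===== Notes on version B (the rewrite author's own statement) =====
-- stated objective: alternative
-- what changed: B builds a histogram (dict) of genotype pairs (cow1[i],cow2[i]) in one pass and answers purely by table lookups / a filtered sum over the table, instead of A's per-branch loop with a running conditional counter.
-- outside the precondition, e.g. on counter_ibs([1, 1], [], 0): A returns 0, B raises IndexError; on counter_ibs([2, 0], [2], 5): A raises IndexError, B raises IndexError
import Mathlib
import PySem

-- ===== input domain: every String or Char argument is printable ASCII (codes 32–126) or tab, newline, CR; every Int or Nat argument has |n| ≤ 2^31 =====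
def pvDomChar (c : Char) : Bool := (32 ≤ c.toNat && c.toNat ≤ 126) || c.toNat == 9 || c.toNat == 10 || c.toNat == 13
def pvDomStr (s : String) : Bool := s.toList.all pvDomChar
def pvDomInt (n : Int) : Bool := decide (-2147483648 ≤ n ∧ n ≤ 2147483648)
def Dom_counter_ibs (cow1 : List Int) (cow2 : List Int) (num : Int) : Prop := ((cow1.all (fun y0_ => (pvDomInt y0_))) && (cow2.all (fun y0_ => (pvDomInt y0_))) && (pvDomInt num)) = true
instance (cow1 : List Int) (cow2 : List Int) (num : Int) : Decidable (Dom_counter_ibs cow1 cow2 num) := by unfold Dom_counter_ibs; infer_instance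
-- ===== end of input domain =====

-- B replaces A's per-branch loop with a running conditional counter by a one-pass
-- histogram of genotype pairs, answered by table lookups / a filtered sum (objective: alternative).

-- ===== PORT A =====
def counter_ibs (cow1 : List Int) (cow2 : List Int) (num : Int) : Int :=
  if num == 0 then
    (PySem.List.pyRange 0 (PySem.List.len cow1) 1).foldl (fun counter i =>
      if (PySem.List.pyGetD cow1 i 0 == 2 && PySem.List.pyGetD cow2 i 0 == 0)
          || (PySem.List.pyGetD cow1 i 0 == 0 && PySem.List.pyGetD cow2 i 0 == 2)
      then counter + 1 else counter + 0) 0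
  else if num == 1 then
    (PySem.List.pyRange 0 (PySem.List.len cow1) 1).foldl (fun counter i =>
      if (PySem.List.pyGetD cow1 i 0 == 2 && PySem.List.pyGetD cow2 i 0 == 1)
          || (PySem.List.pyGetD cow1 i 0 == 1 && PySem.List.pyGetD cow2 i 0 == 2)
          || (PySem.List.pyGetD cow1 i 0 == 1 && PySem.List.pyGetD cow2 i 0 == 0)
          || (PySem.List.pyGetD cow1 i 0 == 0 && PySem.List.pyGetD cow2 i 0 == 1)
      then counter + 1 else counter + 0) 0
  else
    (PySem.List.pyRange 0 (PySem.List.len cow1) 1).foldl (fun counter i =>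
      if PySem.List.pyGetD cow1 i 0 == PySem.List.pyGetD cow2 i 0
      then counter + 1 else counter + 0) 0

-- ===== PORT B =====
def counter_ibs_alt (cow1 : List Int) (cow2 : List Int) (num : Int) : Int :=
  let pairs := (PySem.List.pyRange 0 (PySem.List.len cow1) 1).map
      (fun i => (PySem.List.pyGetD cow1 i 0, PySem.List.pyGetD cow2 i 0))
  let table := pairs.foldl (fun d p => d.modify p 0 (· + 1)) PySem.Dict.empty
  if num == 0 then
    table.getD (2, 0) 0 + table.getD (0, 2) 0
  else if num == 1 then
    table.getD (2, 1) 0 + table.getD (1, 2) 0 + table.getD (1, 0) 0 + table.getD (0, 1) 0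
  else
    ((table.items.filter (fun p => p.1.1 == p.1.2)).map (·.2)).sum

-- ===== PRECONDITION & SPEC =====
-- Pre_ excludes inputs where cow2 is shorter than cow1: there A raises IndexError, except
-- when and/or short-circuiting happens to skip every out-of-range cow2 access, an accident
-- of A's condition order on which B (which always builds the full pair) raises IndexError.
def Pre_counter_ibs (cow1 : List Int) (cow2 : List Int) (num : Int) : Prop :=
  cow1.length ≤ cow2.length
instance (cow1 : List Int) (cow2 : List Int) (num : Int) : Decidable (Pre_counter_ibs cow1 cow2 num) := by unfold Pre_counter_ibs; infer_instance
def pvWitness_counter_ibs : List Int × List Int × Int := ([2, 0, 1, 1], [0, 2, 1, 0], 0)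

def Spec_counter_ibs (cow1 : List Int) (cow2 : List Int) (num : Int) (out : Int) : Prop := out = counter_ibs_alt cow1 cow2 num
instance (cow1 : List Int) (cow2 : List Int) (num : Int) (out : Int) : Decidable (Spec_counter_ibs cow1 cow2 num out) := by unfold Spec_counter_ibs; infer_instance

-- ===== CLAIM (what is proved, stated in full; the proofs are below) =====
def Claim_equal_counter_ibs : Prop := ∀ (cow1 : List Int) (cow2 : List Int) (num : Int), Dom_counter_ibs cow1 cow2 num → Pre_counter_ibs cow1 cow2 num → Spec_counter_ibs cow1 cow2 num (counter_ibs cow1 cow2 num)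

-- ===== LEMMAS AND PROOFS =====

-- A's loop shape: a fold adding 1 or 0 is a countP.
theorem foldl_ibs_count (P : Int × Int → Bool) :
    ∀ (ps : List (Int × Int)) (c : Int),
      ps.foldl (fun counter p => if P p then counter + 1 else counter + 0) c
        = c + (ps.countP P : Int) := by
  intro ps
  induction ps with
  | nil => simp
  | cons p t ih =>
    intro c
    simp only [List.foldl_cons, List.countP_cons, ih]
    by_cases h : P p = true <;> simp [h] <;> push_cast <;> ring

-- countP of a disjunction of pointwise-disjoint predicates splits.
theorem countP_or_disjoint {α : Type} (p q : α → Bool) (l : List α)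
    (h : ∀ a ∈ l, ¬(p a = true ∧ q a = true)) :
    l.countP (fun a => p a || q a) = l.countP p + l.countP q := by
  induction l with
  | nil => simp
  | cons a t ih =>
    have ha := h a (by simp)
    have ih' := ih (fun x hx => h x (by simp [hx]))
    simp only [List.countP_cons, ih']
    by_cases hp : p a = true <;> by_cases hq : q a = true <;> simp [hp, hq] at * <;> omega

-- summing the histogram cells selected by q over a nodup key list covering xs is countP q xs.
theorem sum_filtered_counts (q : Int × Int → Bool) :
    ∀ (xs ks : List (Int × Int)), ks.Nodup → (∀ x ∈ xs, x ∈ ks) →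
      (((ks.filter q).map (fun k => (xs.count k : Int))).sum) = (xs.countP q : Int) := by
  intro xs
  induction xs with
  | nil => intro ks _ _; simp
  | cons x t ih =>
    intro ks hnd hmem
    have hx : x ∈ ks := hmem x (by simp)
    have ih' := ih ks hnd (fun y hy => hmem y (by simp [hy]))
    have hcnt : ∀ k : Int × Int, ((x :: t).count k : Int)
        = (t.count k : Int) + (if k == x then 1 else 0) := by
      intro k
      by_cases h : k = x
      · simp [List.count_cons, h]
      · have h2 : (x == k) = false := by simp [Ne.symm h]
        simp [List.count_cons, h2, h]
    rw [List.map_congr_left (fun k _ => hcnt k)]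
    have hsum : ((ks.filter q).map (fun k => (t.count k : Int) + (if k == x then 1 else 0))).sum
        = ((ks.filter q).map (fun k => (t.count k : Int))).sum
          + ((ks.filter q).map (fun k => (if k == x then 1 else 0 : Int))).sum := by
      simp [List.sum_map_add]
    rw [hsum, ih', PySem.List.sum_map_ite_one_zero]
    have hc : (ks.filter q).countP (fun k => k == x) = (ks.filter q).count x := by
      simp [List.count]
    rw [hc]
    by_cases hq : q x = true
    · have h1 : (ks.filter q).count x = 1 :=
        List.count_eq_one_of_mem (hnd.filter q) (List.mem_filter.mpr ⟨hx, hq⟩)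
      rw [h1]
      simp [hq]
    · have h1 : (ks.filter q).count x = 0 :=
        List.count_eq_zero.mpr (fun hm => hq (List.mem_filter.mp hm).2)
      rw [h1]
      simp [hq]

-- getD of the histogram fold is the pair count
theorem tab_getD (ps : List (Int × Int)) (k : Int × Int) :
    (ps.foldl (fun d p => d.modify p 0 (· + 1)) PySem.Dict.empty).getD k 0
      = (ps.count k : Int) := by
  rw [PySem.Dict.getD_foldl_modify_add_one]
  simp [PySem.Dict.getD_empty]

theorem count_eq_countP_beq (ps : List (Int × Int)) (k : Int × Int) :
    (ps.count k) = ps.countP (fun p => p == k) := by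
  simp [List.count]

theorem beq_ne_both (k1 k2 : Int × Int) (h : k1 ≠ k2) (a : Int × Int) :
    ¬((a == k1) = true ∧ (a == k2) = true) := by
  rintro ⟨h1, h2⟩
  exact h ((eq_of_beq h1).symm.trans (eq_of_beq h2))

theorem counter_ibs_eq (cow1 cow2 : List Int) (num : Int) :
    counter_ibs cow1 cow2 num = counter_ibs_alt cow1 cow2 num := by
  unfold counter_ibs counter_ibs_alt
  have hfold := fun (P : Int × Int → Bool) =>
    foldl_ibs_count P (((PySem.List.pyRange 0 (PySem.List.len cow1) 1)).map
      (fun i => (PySem.List.pyGetD cow1 i 0, PySem.List.pyGetD cow2 i 0))) 0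
  simp only [List.foldl_map] at hfold
  by_cases h0 : num == 0
  · simp only [h0, if_true]
    rw [hfold (fun p => (p.1 == 2 && p.2 == 0) || (p.1 == 0 && p.2 == 2))]
    rw [tab_getD, tab_getD, zero_add]
    rw [countP_or_disjoint _ _ _ (by
      intro a _
      exact beq_ne_both (2,0) (0,2) (by decide) a)]
    rw [count_eq_countP_beq, count_eq_countP_beq]
    push_cast
    rfl
  · rw [if_neg h0, if_neg h0]
    by_cases h1 : num == 1
    · rw [if_pos h1, if_pos h1]
      rw [hfold (fun p => (p.1 == 2 && p.2 == 1) || (p.1 == 1 && p.2 == 2)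
            || (p.1 == 1 && p.2 == 0) || (p.1 == 0 && p.2 == 1))]
      rw [tab_getD, tab_getD, tab_getD, tab_getD, zero_add]
      rw [countP_or_disjoint _ _ _ (by
        intro a _
        rintro ⟨h1, h2⟩
        have ha : a = ((0:Int), (1:Int)) := eq_of_beq h2
        subst ha
        exact absurd h1 (by decide))]
      rw [countP_or_disjoint _ _ _ (by
        intro a _
        rintro ⟨h1, h2⟩
        have ha : a = ((1:Int), (0:Int)) := eq_of_beq h2
        subst ha
        exact absurd h1 (by decide))]
      rw [countP_or_disjoint _ _ _ (by
        intro a _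
        exact beq_ne_both (2,1) (1,2) (by decide) a)]
      rw [count_eq_countP_beq, count_eq_countP_beq, count_eq_countP_beq, count_eq_countP_beq]
      push_cast
      ring_nf
      rfl
    · rw [if_neg h1, if_neg h1]
      rw [hfold (fun p => p.1 == p.2), zero_add]
      rw [← PySem.Dict.counter_eq_foldl, PySem.Dict.items_counter]
      rw [List.filter_map, List.map_map]
      simp only [Function.comp_def]
      rw [sum_filtered_counts (fun k => k.1 == k.2) _ _
        (PySem.Set.nodup_ofList _) (fun x hx => (PySem.Set.mem_ofList _ _).mpr hx)]

-- ===== VERDICT (by name: the statement is the Claim_ definition above) =====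
theorem counter_ibs_spec : Claim_equal_counter_ibs := by
  intro cow1 cow2 num _ _
  exact counter_ibs_eq cow1 cow2 num
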